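-- pv_equiv track=rewrite | github.com/shresht1000/lcd_card_game | game.py | is_same_suit_sequence
-- ===== SOURCE A (Python) =====
-- def is_same_suit_sequence(selected_indices, Value, Suit):
--     """
--     Checks if selected cards contain at least one group of 3 or more
--     cards of the same suit in consecutive sequence.
--     """
--     if len(selected_indices) < 3:
--         return False
--
--     # Group selected cards by suit
--     suit_groups = {}
--     for i in selected_indices:
--         s = Suit[i]
--         suit_groups.setdefault(s, []).append(Value[i])
--
--     # Check if any suit group has 3 or more cards in consecutive sequence
--     for s, vals in suit_groups.items():
--         if len(vals) < 3:
--             continue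
--         vals.sort()
--         consecutive = True
--         for i in range(len(vals) - 1):
--             if vals[i] + 1 != vals[i + 1]:
--                 consecutive = False
--                 break
--         if consecutive:
--             return True
--     return False
-- ===== SOURCE B (Python) =====
-- def is_same_suit_sequence(selected_indices, Value, Suit):
--     """
--     Checks if selected cards contain at least one group of 3 or more
--     cards of the same suit in consecutive sequence.
--     """
--     if len(selected_indices) < 3:
--         return False
--
--     suit_groups = {}
--     for i in selected_indices:
--         suit_groups.setdefault(Suit[i], []).append(Value[i])
--
--     # A group is a consecutive run iff its values are distinct and their
--     # span equals len-1 (set-size + min/max check instead of sort + scan).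
--     return any(
--         len(vals) >= 3
--         and len(set(vals)) == len(vals)
--         and max(vals) - min(vals) == len(vals) - 1
--         for vals in suit_groups.values()
--     )
-- ===== Notes on version B (the rewrite author's own statement) =====
-- stated objective: simpler
-- what changed: Per suit group, the sort followed by an adjacent-pair scan is replaced by a sortless distinctness-plus-span test (len(set(vals))==len(vals) and max-min==len-1), and the outer loop with flag/continue/early-return becomes a single any(...) over the groups.
import Mathlib
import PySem

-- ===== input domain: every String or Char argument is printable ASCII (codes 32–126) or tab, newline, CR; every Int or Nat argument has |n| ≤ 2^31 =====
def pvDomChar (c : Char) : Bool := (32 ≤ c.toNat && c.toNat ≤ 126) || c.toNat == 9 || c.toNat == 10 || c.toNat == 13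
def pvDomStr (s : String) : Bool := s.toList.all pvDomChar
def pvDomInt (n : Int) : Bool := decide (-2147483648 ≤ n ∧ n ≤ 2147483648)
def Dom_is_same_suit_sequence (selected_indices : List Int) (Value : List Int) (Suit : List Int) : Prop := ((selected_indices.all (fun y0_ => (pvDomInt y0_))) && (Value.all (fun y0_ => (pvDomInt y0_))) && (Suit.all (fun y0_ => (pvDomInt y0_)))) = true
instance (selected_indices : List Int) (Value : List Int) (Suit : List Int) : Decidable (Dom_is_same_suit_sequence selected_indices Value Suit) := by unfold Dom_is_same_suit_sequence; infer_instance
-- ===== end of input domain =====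

-- B replaces A's per-group sort + adjacent-pair scan by a sortless distinctness-plus-span
-- test and the flag/early-return outer loop by a single any(...) over the groups (simpler).

-- ===== PORT A =====
-- grouping loop shared by both Pythons verbatim: suit_groups.setdefault(Suit[i], []).append(Value[i])
def pvGroups (selected_indices : List Int) (Value : List Int) (Suit : List Int) :
    PySem.Dict Int (List Int) :=
  selected_indices.foldl
    (fun d i => d.modify (PySem.List.pyGetD Suit i 0) []
                  (fun l => l ++ [PySem.List.pyGetD Value i 0]))
    PySem.Dict.empty

-- A's inner loop: for i in range(len(vals)-1): if vals[i]+1 != vals[i+1]: break — over adjacent pairs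
def pvScanA : List Int → Bool
  | a :: b :: t => if a + 1 ≠ b then false else pvScanA (b :: t)
  | _ => true

-- A's outer loop over suit_groups.items() with continue / early return
def pvOuterA : List (Int × List Int) → Bool
  | [] => false
  | (_, vals) :: rest =>
    if vals.length < 3 then pvOuterA rest
    else if pvScanA (PySem.List.sorted vals (fun x => x) false) then true
    else pvOuterA rest

def is_same_suit_sequence (selected_indices : List Int) (Value : List Int) (Suit : List Int) : Bool :=
  if selected_indices.length < 3 then false
  else pvOuterA (pvGroups selected_indices Value Suit).items

-- ===== PORT B =====
-- len(vals) >= 3 and len(set(vals)) == len(vals) and max(vals) - min(vals) == len(vals) - 1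
def pvRunB (vals : List Int) : Bool :=
  decide (3 ≤ vals.length) &&
  ((PySem.Set.ofList vals).length == vals.length) &&
  (match PySem.List.max? vals (fun x => x), PySem.List.min? vals (fun x => x) with
   | some mx, some mn => decide (mx - mn = (vals.length : Int) - 1)
   | _, _ => false)   -- unreachable: the len >= 3 conjunct guards max/min on []

def is_same_suit_sequence_alt (selected_indices : List Int) (Value : List Int) (Suit : List Int) : Bool :=
  if selected_indices.length < 3 then false
  else (pvGroups selected_indices Value Suit).values.any pvRunB

-- ===== PRECONDITION & SPEC =====
-- Pre_ excludes exactly the inputs where A raises IndexError: some selected index out of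
-- range for Suit/Value while len(selected_indices) >= 3 (with fewer than 3 indices A
-- returns False without indexing, so those inputs stay inside Pre_).
def Pre_is_same_suit_sequence (selected_indices : List Int) (Value : List Int) (Suit : List Int) : Prop :=
  selected_indices.length < 3 ∨
    ∀ i ∈ selected_indices,
      PySem.Raise.InRange Suit.length i ∧ PySem.Raise.InRange Value.length i
instance (selected_indices : List Int) (Value : List Int) (Suit : List Int) : Decidable (Pre_is_same_suit_sequence selected_indices Value Suit) := by unfold Pre_is_same_suit_sequence; infer_instance

def pvWitness_is_same_suit_sequence : List Int × List Int × List Int :=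
  ([0, 1, 2], [5, 7, 6], [1, 1, 1])

def Spec_is_same_suit_sequence (selected_indices : List Int) (Value : List Int) (Suit : List Int) (out : Bool) : Prop := out = is_same_suit_sequence_alt selected_indices Value Suit
instance (selected_indices : List Int) (Value : List Int) (Suit : List Int) (out : Bool) : Decidable (Spec_is_same_suit_sequence selected_indices Value Suit out) := by unfold Spec_is_same_suit_sequence; infer_instance

-- ===== CLAIM (what is proved, stated in full; the proofs are below) =====
def Claim_equal_is_same_suit_sequence : Prop := ∀ (selected_indices : List Int) (Value : List Int) (Suit : List Int), Dom_is_same_suit_sequence selected_indices Value Suit → Pre_is_same_suit_sequence selected_indices Value Suit → Spec_is_same_suit_sequence selected_indices Value Suit (is_same_suit_sequence selected_indices Value Suit)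

-- ===== LEMMAS AND PROOFS =====

-- PySem.Set.ofList is a sublist of its input (prefix accumulator generalized)
theorem pvOfList_sublist_aux (xs acc : List Int) :
    ∃ t : List Int, t.Sublist xs ∧ List.foldl PySem.Set.add acc xs = acc ++ t := by
  induction xs generalizing acc with
  | nil => exact ⟨[], by simp⟩
  | cons x xs ih =>
    simp only [List.foldl_cons]
    rcases ih (PySem.Set.add acc x) with ⟨t, hs, he⟩
    by_cases h : x ∈ acc
    · have ha : PySem.Set.add acc x = acc := by simp [PySem.Set.add, h]
      exact ⟨t, hs.cons x, by rw [he, ha]⟩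
    · have ha : PySem.Set.add acc x = acc ++ [x] := by simp [PySem.Set.add, h]
      exact ⟨x :: t, hs.cons₂ x, by rw [he, ha]; simp⟩

theorem pvOfList_sublist (xs : List Int) : (PySem.Set.ofList xs).Sublist xs := by
  rcases pvOfList_sublist_aux xs [] with ⟨t, hs, he⟩
  have : PySem.Set.ofList xs = t := by simpa [PySem.Set.ofList, PySem.Set.empty] using he
  rw [this]; exact hs

theorem pvSetLen_iff_nodup (xs : List Int) :
    (PySem.Set.ofList xs).length = xs.length ↔ xs.Nodup := by
  constructor
  · intro h
    have := (pvOfList_sublist xs).eq_of_length h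
    rw [← this]; exact PySem.Set.nodup_ofList xs
  · intro h
    have hsub : xs ⊆ PySem.Set.ofList xs := fun a ha => (PySem.Set.mem_ofList xs a).mpr ha
    have hle : xs.length ≤ (PySem.Set.ofList xs).length := (h.subperm hsub).length_le
    have : PySem.Set.ofList xs = xs := (pvOfList_sublist xs).eq_of_length_le hle
    rw [this]

-- pvScanA s = true ↔ every adjacent pair increases by exactly 1
theorem pvScanA_iff (s : List Int) :
    pvScanA s = true ↔ ∀ k (h : k + 1 < s.length), s[k + 1] = s[k] + 1 := by
  induction s with
  | nil => simp [pvScanA]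
  | cons a s ih =>
    cases s with
    | nil => simp [pvScanA]
    | cons b t =>
      constructor
      · intro h k hk
        rw [show pvScanA (a :: b :: t) = if a + 1 ≠ b then false else pvScanA (b :: t) from rfl] at h
        by_cases hab : a + 1 ≠ b
        · rw [if_pos hab] at h; exact absurd h (by simp)
        · rw [if_neg hab] at h
          rw [not_not] at hab
          cases k with
          | zero => simpa using hab.symm
          | succ k =>
            have := (ih.mp h) k (by simpa using hk)
            simpa using this
      · intro h
        rw [show pvScanA (a :: b :: t) = if a + 1 ≠ b then false else pvScanA (b :: t) from rfl]
        have h0 := h 0 (by simp)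
        simp at h0
        rw [if_neg (by omega)]
        exact ih.mpr (fun k hk => by
          have := h (k + 1) (by simpa using hk)
          simpa using this)

-- forward: a chain list is arithmetic from its head
theorem pvChain_getElem (s : List Int)
    (h : ∀ k (hk : k + 1 < s.length), s[k + 1] = s[k] + 1)
    (k : ℕ) (hk : k < s.length) (h0 : 0 < s.length) :
    s[k] = s[0] + k := by
  induction k with
  | zero => simp
  | succ k ih =>
    have := h k hk
    rw [this, ih (by omega)]
    push_cast; ring

-- backward: a strictly increasing integer list grows by at least the index gap
theorem pvStrict_gap (s : List Int) (hlt : s.Pairwise (· < ·))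
    (p q : ℕ) (hpq : p ≤ q) (hq : q < s.length) :
    s[p]'(by omega) + (q - p : ℕ) ≤ s[q] := by
  induction q with
  | zero =>
    have : p = 0 := by omega
    subst this; simp
  | succ q ih =>
    by_cases h : p = q + 1
    · subst h; simp
    · have hp : p ≤ q := by omega
      have h1 := ih hp (by omega)
      have h2 : s[q]'(by omega) < s[q + 1] :=
        (List.pairwise_iff_getElem.mp hlt) q (q + 1) (by omega) hq (by omega)
      have : (q + 1 - p : ℕ) = (q - p : ℕ) + 1 := by omega
      rw [this]; push_cast; omega

-- the per-group equivalence: sort + adjacent scan  =  distinct + span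
theorem pvGroup_lemma (vals : List Int) (h3 : 3 ≤ vals.length) :
    pvScanA (PySem.List.sorted vals (fun x => x) false) = pvRunB vals := by
  have hne : vals ≠ [] := by intro h; rw [h] at h3; simp at h3
  obtain ⟨mx, hmx⟩ : ∃ mx, PySem.List.max? vals (fun x => x) = some mx := by
    cases hm : PySem.List.max? vals (fun x => x) with
    | none => exact absurd ((PySem.List.max?_eq_none_iff _ _).mp hm) hne
    | some m => exact ⟨m, rfl⟩
  obtain ⟨mn, hmn⟩ : ∃ mn, PySem.List.min? vals (fun x => x) = some mn := by
    cases hm : PySem.List.min? vals (fun x => x) with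
    | none => exact absurd ((PySem.List.min?_eq_none_iff _ _).mp hm) hne
    | some m => exact ⟨m, rfl⟩
  have hperm : (PySem.List.sorted vals (fun x => x) false).Perm vals :=
    PySem.List.sorted_perm vals (fun x => x) false
  set s := PySem.List.sorted vals (fun x => x) false with hsdef
  have hlen : s.length = vals.length := hperm.length_eq
  have hle : s.Pairwise (fun a b => a ≤ b) := PySem.List.sorted_pairwise vals (fun x => x)
  have h0lt : 0 < s.length := by omega
  rw [Bool.eq_iff_iff]
  unfold pvRunB
  rw [hmx, hmn]
  simp only [Bool.and_eq_true, beq_iff_eq, decide_eq_true_eq]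
  rw [pvScanA_iff, pvSetLen_iff_nodup]
  constructor
  · intro hchain
    have hget : ∀ k (hk : k < s.length), s[k] = s[0]'h0lt + k :=
      fun k hk => pvChain_getElem s hchain k hk h0lt
    have hpl : s.Pairwise (· < ·) := List.pairwise_iff_getElem.mpr (fun i j hi hj hij => by
      rw [hget i hi, hget j hj]; omega)
    have hnodup : vals.Nodup := hperm.nodup_iff.mp (hpl.imp ne_of_lt)
    -- mn = s[0]
    have hmnle : mn ≤ s[0]'h0lt :=
      PySem.List.min?_isMin hmn _ (hperm.subset (s.getElem_mem h0lt))
    obtain ⟨k, hk, hkeq⟩ := List.mem_iff_getElem.mp (hperm.mem_iff.mpr (PySem.List.min?_mem hmn))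
    have hmn0 : mn = s[0]'h0lt := by
      have := hget k hk; omega
    -- mx = s[len-1]
    have hlast : s.length - 1 < s.length := by omega
    have hmxge : s[s.length - 1] ≤ mx :=
      PySem.List.max?_isMax hmx _ (hperm.subset (s.getElem_mem hlast))
    obtain ⟨j, hj, hjeq⟩ := List.mem_iff_getElem.mp (hperm.mem_iff.mpr (PySem.List.max?_mem hmx))
    have hmxv : mx = s[0]'h0lt + (s.length - 1 : ℕ) := by
      have hj' := hget j hj
      have hl' := hget (s.length - 1) hlast
      omega
    refine ⟨⟨by omega, hnodup⟩, by omega⟩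
  · rintro ⟨⟨-, hnodup⟩, hspan⟩
    have hnodup_s : s.Nodup := hperm.nodup_iff.mpr hnodup
    have hpl : s.Pairwise (· < ·) := by
      rw [List.pairwise_iff_getElem] at hle ⊢
      intro i j hi hj hij
      refine lt_of_le_of_ne (hle i j hi hj hij) ?_
      intro heq
      exact absurd ((List.Nodup.getElem_inj_iff hnodup_s).mp heq) (by omega)
    have hgap := pvStrict_gap s hpl
    -- s[0] = mn
    have hmnle : mn ≤ s[0]'h0lt :=
      PySem.List.min?_isMin hmn _ (hperm.subset (s.getElem_mem h0lt))
    obtain ⟨k, hk, hkeq⟩ := List.mem_iff_getElem.mp (hperm.mem_iff.mpr (PySem.List.min?_mem hmn))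
    have h0k := hgap 0 k (by omega) hk
    have hmn0 : s[0]'h0lt = mn := by omega
    -- s[len-1] = mx
    have hlast : s.length - 1 < s.length := by omega
    have hmxge : s[s.length - 1] ≤ mx :=
      PySem.List.max?_isMax hmx _ (hperm.subset (s.getElem_mem hlast))
    obtain ⟨j, hj, hjeq⟩ := List.mem_iff_getElem.mp (hperm.mem_iff.mpr (PySem.List.max?_mem hmx))
    have hjl := hgap j (s.length - 1) (by omega) hlast
    have hmxl : s[s.length - 1] = mx := by omega
    intro k' hk'
    have h1 : s[k']'(by omega) < s[k' + 1] :=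
      (List.pairwise_iff_getElem.mp hpl) k' (k' + 1) (by omega) hk' (by omega)
    have h2 := hgap 0 k' (by omega) (by omega)
    have h3' := hgap (k' + 1) (s.length - 1) (by omega) hlast
    omega

theorem pvOuter_lemma (l : List (Int × List Int)) :
    pvOuterA l = (l.map (fun x => x.2)).any pvRunB := by
  induction l with
  | nil => simp [pvOuterA]
  | cons p l ih =>
    obtain ⟨s, vals⟩ := p
    by_cases h : vals.length < 3
    · have : pvRunB vals = false := by
        unfold pvRunB
        simp [decide_eq_false (by omega : ¬ 3 ≤ vals.length)]
      simp [pvOuterA, h, this, ih]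
    · rw [show pvOuterA ((s, vals) :: l) = if pvScanA (PySem.List.sorted vals (fun x => x) false) then true else pvOuterA l from by simp [pvOuterA, h]]
      rw [pvGroup_lemma vals (by omega)]
      cases hb : pvRunB vals <;> simp [hb, ih]

-- ===== VERDICT (by name: the statement is the Claim_ definition above) =====
theorem is_same_suit_sequence_spec : Claim_equal_is_same_suit_sequence := by
  intro si V S _ _
  unfold Spec_is_same_suit_sequence is_same_suit_sequence is_same_suit_sequence_alt
  by_cases h : si.length < 3
  · simp [h]
  · simp only [h, if_false]
    rw [pvOuter_lemma]
    rfl
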